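-- pv_equiv track=rewrite | github.com/luyizhou4/espnet | egs/codeswitching/asr/local_yzl23/text_norm/generate_espnet_json_moe.py | get_lidaf_label_ids
-- ===== SOURCE A (Python) =====
-- def get_lidaf_label_ids(label_ids, divider, lid_tokens):
--     ''' Given label ids, return lid_after label_ids
--         e.g. "english words 中 文" ==> "english words <EN> 中 文 <CN>"
--         :param label_ids: list of int, label tokens
--         :param divider: unk token id, used as a divider
--         :lid_tokens: list of int tokens ids for <EN> and <CN>
--     '''
--     # currently we only support CN/EN codeswitching mode
--     assert len(lid_tokens) == 2
--     assert divider > 0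
--     # for empty utterance, directly return
--     if len(label_ids) == 0:
--         return label_ids
--
--     out_label_ids = []
--     for index, label_token in enumerate(label_ids):
--         lang_state = 0 if label_token < divider else 1
--         # check if it's time to emit language tokens
--         if index == len(label_ids)-1:
--             emit_status = True
--         elif bool(label_token // divider) != bool(label_ids[index+1] // divider):
--             emit_status = True
--         else:
--             emit_status = False
--
--         if emit_status:
--             out_label_ids.extend([label_token, lid_tokens[lang_state]])
--         else:
--             out_label_ids.append(label_token)
--
--     return out_label_ids
-- ===== SOURCE B (Python) =====
-- def get_lidaf_label_ids(label_ids, divider, lid_tokens):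
--     ''' Single pass over maximal runs of tokens sharing the language key
--         bool(token // divider); one marker is appended after each run,
--         chosen by the run's last token (< divider -> lid_tokens[0]). '''
--     assert len(lid_tokens) == 2
--     assert divider > 0
--     if len(label_ids) == 0:
--         return label_ids
--     out = []
--     run = [label_ids[0]]
--     for tok in label_ids[1:]:
--         if bool(tok // divider) != bool(run[-1] // divider):
--             out += run + [lid_tokens[0 if run[-1] < divider else 1]]
--             run = [tok]
--         else:
--             run.append(tok)
--     out += run + [lid_tokens[0 if run[-1] < divider else 1]]
--     return out
-- ===== Notes on version B (the rewrite author's own statement) =====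
-- stated objective: simpler
-- what changed: Replaced the per-index loop with a next-neighbor lookahead (label_ids[index+1]) and an index==len-1 last-element test by a single accumulator pass over maximal same-language runs: tokens are collected into the current run and, when the language key changes or input ends, the run is flushed followed by one marker chosen from the run's last token.
import Mathlib
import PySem

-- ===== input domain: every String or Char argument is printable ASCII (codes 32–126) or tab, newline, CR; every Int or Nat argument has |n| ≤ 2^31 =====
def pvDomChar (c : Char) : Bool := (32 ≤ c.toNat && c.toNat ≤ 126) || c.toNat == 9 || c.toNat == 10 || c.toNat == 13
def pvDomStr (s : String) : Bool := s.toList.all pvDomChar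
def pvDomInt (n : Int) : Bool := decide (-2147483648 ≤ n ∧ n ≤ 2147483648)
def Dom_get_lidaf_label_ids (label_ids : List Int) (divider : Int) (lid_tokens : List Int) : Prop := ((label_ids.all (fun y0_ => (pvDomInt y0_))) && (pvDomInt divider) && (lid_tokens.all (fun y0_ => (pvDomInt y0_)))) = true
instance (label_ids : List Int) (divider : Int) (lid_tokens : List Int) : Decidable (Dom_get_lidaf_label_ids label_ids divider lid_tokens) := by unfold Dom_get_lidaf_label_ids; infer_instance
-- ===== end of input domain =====

-- B replaces A's per-index next-neighbor boundary test with a single pass over maximal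
-- same-language runs, emitting each run followed by one marker (objective: simpler).

-- ===== PORT A =====
-- list indexing ported with pyGetD 0: under Pre_ every access A performs is in range,
-- so the default is never the result where A returns.
def get_lidaf_label_ids (label_ids : List Int) (divider : Int) (lid_tokens : List Int) : List Int :=
  if label_ids.length = 0 then label_ids
  else
    (PySem.List.enumerate label_ids).foldl (fun out p =>
      let index := p.1
      let label_token := p.2
      let lang_state : Int := if label_token < divider then 0 else 1
      let emit_status : Bool :=
        if index = (label_ids.length : Int) - 1 then true
        else if (decide (PySem.Int.floordiv label_token divider ≠ 0))
              != (decide (PySem.Int.floordiv (PySem.List.pyGetD label_ids (index + 1) 0) divider ≠ 0)) then true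
        else false
      if emit_status then out ++ [label_token, PySem.List.pyGetD lid_tokens lang_state 0]
      else out ++ [label_token]) []

-- ===== PORT B =====
def pvKey (divider t : Int) : Bool := decide (PySem.Int.floordiv t divider ≠ 0)

def pvMarker (divider : Int) (lid_tokens : List Int) (t : Int) : Int :=
  PySem.List.pyGetD lid_tokens (if t < divider then (0 : Int) else 1) 0

def get_lidaf_label_ids_alt (label_ids : List Int) (divider : Int) (lid_tokens : List Int) : List Int :=
  match label_ids with
  | [] => label_ids
  | first :: rest =>
    let s := rest.foldl (fun (st : List Int × List Int) tok =>
        if pvKey divider tok != pvKey divider st.2.getLast! then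
          (st.1 ++ st.2 ++ [pvMarker divider lid_tokens st.2.getLast!], [tok])
        else (st.1, st.2 ++ [tok])) ([], [first])
    s.1 ++ s.2 ++ [pvMarker divider lid_tokens s.2.getLast!]

-- ===== PRECONDITION & SPEC =====
-- Pre_ = exactly where A's two asserts pass (otherwise A raises AssertionError).
def Pre_get_lidaf_label_ids (label_ids : List Int) (divider : Int) (lid_tokens : List Int) : Prop :=
  lid_tokens.length = 2 ∧ 0 < divider
instance (label_ids : List Int) (divider : Int) (lid_tokens : List Int) : Decidable (Pre_get_lidaf_label_ids label_ids divider lid_tokens) := by unfold Pre_get_lidaf_label_ids; infer_instance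

def pvWitness_get_lidaf_label_ids : List Int × Int × List Int := ([1, 5, 2], 3, [100, 101])

def Spec_get_lidaf_label_ids (label_ids : List Int) (divider : Int) (lid_tokens : List Int) (out : List Int) : Prop := out = get_lidaf_label_ids_alt label_ids divider lid_tokens
instance (label_ids : List Int) (divider : Int) (lid_tokens : List Int) (out : List Int) : Decidable (Spec_get_lidaf_label_ids label_ids divider lid_tokens out) := by unfold Spec_get_lidaf_label_ids; infer_instance

-- ===== CLAIM (what is proved, stated in full; the proofs are below) =====
def Claim_equal_get_lidaf_label_ids : Prop := ∀ (label_ids : List Int) (divider : Int) (lid_tokens : List Int), Dom_get_lidaf_label_ids label_ids divider lid_tokens → Pre_get_lidaf_label_ids label_ids divider lid_tokens → Spec_get_lidaf_label_ids label_ids divider lid_tokens (get_lidaf_label_ids label_ids divider lid_tokens)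

-- ===== LEMMAS AND PROOFS =====

-- common reference shape: the output token by token, with a marker after each
-- position that is last or whose successor has a different language key
def pvSpecFun (divider : Int) (lid_tokens : List Int) : List Int → List Int
  | [] => []
  | [a] => [a, pvMarker divider lid_tokens a]
  | a :: b :: rest =>
    (if pvKey divider a != pvKey divider b then [a, pvMarker divider lid_tokens a] else [a])
      ++ pvSpecFun divider lid_tokens (b :: rest)

lemma pv_getLast!_concat (l : List Int) (a : Int) : (l ++ [a]).getLast! = a := by
  induction l with
  | nil => rfl
  | cons x xs ih => simpa [List.getLast!, List.getLast?_concat] using ih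

-- A's indexed loop, generalized over the processed prefix, equals pvSpecFun
lemma pvA_loop (divider : Int) (lid_tokens : List Int) (full : List Int) :
    ∀ (xs pre acc : List Int), full = pre ++ xs →
    (PySem.List.enumerate xs (pre.length : Int)).foldl (fun out p =>
      let index := p.1
      let label_token := p.2
      let lang_state : Int := if label_token < divider then 0 else 1
      let emit_status : Bool :=
        if index = (full.length : Int) - 1 then true
        else if (decide (PySem.Int.floordiv label_token divider ≠ 0))
              != (decide (PySem.Int.floordiv (PySem.List.pyGetD full (index + 1) 0) divider ≠ 0)) then true
        else false
      if emit_status then out ++ [label_token, PySem.List.pyGetD lid_tokens lang_state 0]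
      else out ++ [label_token]) acc
    = acc ++ pvSpecFun divider lid_tokens xs := by
  intro xs
  induction xs with
  | nil => intro pre acc _; simp [PySem.List.enumerate_nil, pvSpecFun]
  | cons a xs' ih =>
    intro pre acc hfull
    rw [PySem.List.enumerate_cons, List.foldl_cons]
    cases xs' with
    | nil =>
      have hidx : (pre.length : Int) = (full.length : Int) - 1 := by
        subst hfull; simp
      simp only [PySem.List.enumerate_nil, List.foldl_nil, hidx, if_true, pvSpecFun, pvMarker]
    | cons b rest =>
      have hne : ((pre.length : Int)) ≠ (full.length : Int) - 1 := by
        subst hfull; simp; omega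
      have hget : PySem.List.pyGetD full ((pre.length : Int) + 1) 0 = b := by
        subst hfull
        have h1 : ((pre.length : Int) + 1) = ((pre.length + 1 : Nat) : Int) := by push_cast; ring
        rw [h1, PySem.List.pyGetD_natCast]
        simp [List.getD]
      have hlen : ((pre.length : Int) + 1) = (((pre ++ [a]).length : Nat) : Int) := by simp
      rw [hlen, ih (pre ++ [a]) _ (by subst hfull; simp)]
      simp only [if_neg hne, hget, pvSpecFun, pvKey, pvMarker]
      by_cases hc : PySem.Int.floordiv a divider = 0 ↔ PySem.Int.floordiv b divider = 0 <;>
        simp [hc]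

-- B's run loop, generalized over the pending run (rs ++ [t]) and emitted output
lemma pvB_loop (divider : Int) (lid_tokens : List Int) :
    ∀ (xs out rs : List Int) (t : Int),
    (let s := xs.foldl (fun (st : List Int × List Int) tok =>
        if pvKey divider tok != pvKey divider st.2.getLast! then
          (st.1 ++ st.2 ++ [pvMarker divider lid_tokens st.2.getLast!], [tok])
        else (st.1, st.2 ++ [tok])) (out, rs ++ [t])
     s.1 ++ s.2 ++ [pvMarker divider lid_tokens s.2.getLast!])
    = out ++ rs ++ pvSpecFun divider lid_tokens (t :: xs) := by
  intro xs
  induction xs with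
  | nil => intro out rs t; simp [pvSpecFun]
  | cons tok xs' ih =>
    intro out rs t
    rw [List.foldl_cons]
    by_cases hk : pvKey divider tok != pvKey divider t
    · have h1 := ih (out ++ (rs ++ [t]) ++ [pvMarker divider lid_tokens t]) [] tok
      simp only [pv_getLast!_concat, if_pos hk]
      simp only [List.nil_append] at h1
      rw [h1]
      have hne : pvKey divider t != pvKey divider tok := by
        cases h : pvKey divider t <;> cases h' : pvKey divider tok <;> simp_all
      simp [pvSpecFun, hne]
    · have h1 := ih out (rs ++ [t]) tok
      simp only [pv_getLast!_concat, if_neg hk]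
      rw [List.append_assoc rs [t] [tok]] at h1 ⊢
      rw [h1]
      have heq : ¬ (pvKey divider t != pvKey divider tok) := by
        cases h : pvKey divider t <;> cases h' : pvKey divider tok <;> simp_all
      simp [pvSpecFun, heq]

-- ===== VERDICT (by name: the statement is the Claim_ definition above) =====
theorem get_lidaf_label_ids_spec : Claim_equal_get_lidaf_label_ids := by
  intro label_ids divider lid_tokens _ _
  unfold Spec_get_lidaf_label_ids
  cases label_ids with
  | nil => rfl
  | cons first rest =>
    show get_lidaf_label_ids (first :: rest) divider lid_tokens
        = get_lidaf_label_ids_alt (first :: rest) divider lid_tokens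
    have hA := pvA_loop divider lid_tokens (first :: rest) (first :: rest) [] [] rfl
    have hB := pvB_loop divider lid_tokens rest [] [] first
    unfold get_lidaf_label_ids get_lidaf_label_ids_alt
    rw [if_neg (by simp)]
    simp only [List.length_nil, Nat.cast_zero] at hA
    rw [hA]
    simp only [List.nil_append] at hB ⊢
    rw [hB]
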